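-- pv_equiv track=rewrite | github.com/Gabrielcg20/hack_python2 | hack_10.py | fn_hack_10
-- ===== SOURCE A (Python) =====
-- def fn_hack_10(s):
--     result = s
--     lista = []
--     for dict in result:
--         for tupla in dict.items():
--             lista2 = list(tupla)
--             for valor in lista2:
--                 lista.append(valor)
--
--     texto = len(lista) + 1
--
--     nueva_lista = [i for i in range(1, texto)]
--     impares = [str(i) for i in nueva_lista if i % 2 != 0]
--     pares = [str(i) for i in nueva_lista if i % 2 == 0]
--
--     result = []
--
--     i = 0
--     while(i < len(pares)):
--         dict = {}
--         dict[impares[i]] = pares[i]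
--         result.append(dict)
--         i += 1
--     return result
-- ===== SOURCE B (Python) =====
-- def fn_hack_10(s):
--     # count 2 entries per key-value pair (calling .items() like A does)
--     n = sum(2 * len(d.items()) for d in s)
--     return [{str(2 * i + 1): str(2 * i + 2)} for i in range(n // 2)]
-- ===== Notes on version B (the rewrite author's own statement) =====
-- stated objective: simpler
-- what changed: Replaces the flattened value list, the range/odd/even partition lists and the indexed while-loop with a single count of entries and one comprehension producing {str(2i+1): str(2i+2)} directly from a closed-form index formula.
import Mathlib
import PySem

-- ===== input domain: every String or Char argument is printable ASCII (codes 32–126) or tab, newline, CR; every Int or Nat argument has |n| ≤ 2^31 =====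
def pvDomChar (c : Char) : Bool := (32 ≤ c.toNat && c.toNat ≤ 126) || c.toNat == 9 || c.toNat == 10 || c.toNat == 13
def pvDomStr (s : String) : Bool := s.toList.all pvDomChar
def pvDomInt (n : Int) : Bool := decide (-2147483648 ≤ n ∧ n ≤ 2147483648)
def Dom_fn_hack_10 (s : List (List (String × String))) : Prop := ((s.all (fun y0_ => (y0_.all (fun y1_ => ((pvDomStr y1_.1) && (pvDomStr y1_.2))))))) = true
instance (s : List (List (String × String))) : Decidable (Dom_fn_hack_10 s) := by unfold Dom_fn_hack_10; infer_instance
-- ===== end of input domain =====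

-- B replaces A's flattened list, odd/even partition lists and indexed while-loop by a
-- count of entries and one comprehension with a closed-form index formula (simpler, same cost).

-- ===== PORT A =====
def fn_hack_10 (s : List (List (String × String))) : List (List (String × String)) :=
  -- nested for-loops appending each key and value to `lista`
  let lista : List String :=
    s.foldl (fun acc d =>
      d.foldl (fun acc2 tupla =>
        [tupla.1, tupla.2].foldl (fun acc3 valor => acc3 ++ [valor]) acc2) acc) []
  let texto : Int := (lista.length : Int) + 1
  let nueva_lista := PySem.List.pyRange 1 texto 1
  let impares := (nueva_lista.filter (fun i => decide (PySem.Int.mod i 2 ≠ 0))).map PySem.Int.toStr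
  let pares := (nueva_lista.filter (fun i => decide (PySem.Int.mod i 2 = 0))).map PySem.Int.toStr
  -- while i < len(pares): result.append({impares[i]: pares[i]}); i += 1
  -- indexing is always in range (len(impares) ≥ len(pares)), so the IndexError case is unreachable
  List.map (fun i : Nat =>
    [((PySem.List.pyGet? impares ((i : Nat) : Int)).getD "", (PySem.List.pyGet? pares ((i : Nat) : Int)).getD "")])
    (List.range pares.length)

-- ===== PORT B =====
def fn_hack_10_alt (s : List (List (String × String))) : List (List (String × String)) :=
  -- n = sum(2 * len(d.items()) for d in s)
  let n : Int := s.foldl (fun acc d => acc + 2 * (d.length : Int)) 0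
  -- [{str(2*i+1): str(2*i+2)} for i in range(n//2)]
  (PySem.List.pyRange 0 (PySem.Int.floordiv n 2) 1).map (fun i =>
    [(PySem.Int.toStr (2 * i + 1), PySem.Int.toStr (2 * i + 2))])

-- ===== PRECONDITION & SPEC =====
def Spec_fn_hack_10 (s : List (List (String × String))) (out : List (List (String × String))) : Prop := out = fn_hack_10_alt s
instance (s : List (List (String × String))) (out : List (List (String × String))) : Decidable (Spec_fn_hack_10 s out) := by unfold Spec_fn_hack_10; infer_instance

-- ===== CLAIM (what is proved, stated in full; the proofs are below) =====
def Claim_equal_fn_hack_10 : Prop := ∀ (s : List (List (String × String))), Dom_fn_hack_10 s → Spec_fn_hack_10 s (fn_hack_10 s)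

-- ===== LEMMAS AND PROOFS =====

-- total number of key-value entries in s
def pvCount (s : List (List (String × String))) : Nat := (s.map List.length).sum

-- the common canonical result
def pvCanon (t : Nat) : List (List (String × String)) :=
  List.map (fun i : Nat =>
    [(PySem.Int.toStr (2 * (i : Int) + 1), PySem.Int.toStr (2 * (i : Int) + 2))]) (List.range t)

theorem pv_inner_len (d : List (String × String)) (acc : List String) :
    (d.foldl (fun acc2 (tupla : String × String) =>
        [tupla.1, tupla.2].foldl (fun acc3 valor => acc3 ++ [valor]) acc2) acc).length
      = acc.length + 2 * d.length := by
  induction d generalizing acc with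
  | nil => simp
  | cons p tl ih =>
    rw [List.foldl_cons]
    rw [ih]
    simp [List.foldl]
    omega

theorem pv_lista_len (s : List (List (String × String))) (acc : List String) :
    (s.foldl (fun acc d =>
        d.foldl (fun acc2 (tupla : String × String) =>
          [tupla.1, tupla.2].foldl (fun acc3 valor => acc3 ++ [valor]) acc2) acc) acc).length
      = acc.length + 2 * pvCount s := by
  induction s generalizing acc with
  | nil => simp [pvCount]
  | cons d tl ih =>
    rw [List.foldl_cons]
    rw [ih, pv_inner_len]
    simp [pvCount]
    omega

theorem pv_odds (t : Nat) :
    (PySem.List.pyRange 1 (2 * (t : Int) + 1) 1).filter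
        (fun i => decide (PySem.Int.mod i 2 ≠ 0))
      = List.map (fun i : Nat => (2 * (i : Int) + 1)) (List.range t) := by
  induction t with
  | zero =>
    rw [show (2 * ((0 : Nat) : Int) + 1) = 1 by norm_num]
    rw [PySem.List.pyRange_one_eq_nil (by norm_num)]
    simp
  | succ t ih =>
    have e1 : (2 * ((t + 1 : Nat) : Int) + 1) = (2 * (t : Int) + 2) + 1 := by push_cast; ring
    rw [e1, PySem.List.pyRange_one_succ_right (by omega : (1 : Int) ≤ 2 * (t : Int) + 2)]
    have e2 : (2 * (t : Int) + 2) = (2 * (t : Int) + 1) + 1 := by ring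
    rw [e2, PySem.List.pyRange_one_succ_right (by omega : (1 : Int) ≤ 2 * (t : Int) + 1)]
    rw [List.filter_append, List.filter_append, ih, List.range_succ, List.map_append]
    have h1 : PySem.Int.mod (2 * (t : Int) + 1) 2 ≠ 0 := by
      rw [PySem.Int.mod_eq_emod_of_pos (by norm_num : (0:Int) < 2)]; omega
    have h2 : PySem.Int.mod (2 * (t : Int) + 1 + 1) 2 = 0 := by
      rw [PySem.Int.mod_eq_emod_of_pos (by norm_num : (0:Int) < 2)]; omega
    simp [List.filter_cons]
    omega

theorem pv_evens (t : Nat) :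
    (PySem.List.pyRange 1 (2 * (t : Int) + 1) 1).filter
        (fun i => decide (PySem.Int.mod i 2 = 0))
      = List.map (fun i : Nat => (2 * (i : Int) + 2)) (List.range t) := by
  induction t with
  | zero =>
    rw [show (2 * ((0 : Nat) : Int) + 1) = 1 by norm_num]
    rw [PySem.List.pyRange_one_eq_nil (by norm_num)]
    simp
  | succ t ih =>
    have e1 : (2 * ((t + 1 : Nat) : Int) + 1) = (2 * (t : Int) + 2) + 1 := by push_cast; ring
    rw [e1, PySem.List.pyRange_one_succ_right (by omega : (1 : Int) ≤ 2 * (t : Int) + 2)]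
    have e2 : (2 * (t : Int) + 2) = (2 * (t : Int) + 1) + 1 := by ring
    rw [e2, PySem.List.pyRange_one_succ_right (by omega : (1 : Int) ≤ 2 * (t : Int) + 1)]
    rw [List.filter_append, List.filter_append, ih, List.range_succ, List.map_append]
    have h1 : PySem.Int.mod (2 * (t : Int) + 1) 2 ≠ 0 := by
      rw [PySem.Int.mod_eq_emod_of_pos (by norm_num : (0:Int) < 2)]; omega
    have h2 : PySem.Int.mod (2 * (t : Int) + 1 + 1) 2 = 0 := by
      rw [PySem.Int.mod_eq_emod_of_pos (by norm_num : (0:Int) < 2)]; omega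
    simp [List.filter_cons]
    have hd : (2 : Int) ∣ 2 * (t : Int) + 1 + 1 := ⟨(t : Int) + 1, by ring⟩
    rw [if_pos hd]
    ring_nf

theorem pv_A_canon (s : List (List (String × String))) :
    fn_hack_10 s = pvCanon (pvCount s) := by
  unfold fn_hack_10
  simp only []
  rw [pv_lista_len s []]
  rw [show (PySem.List.pyRange 1 ((((List.length ([] : List String)) + 2 * pvCount s : Nat) : Int) + 1) 1)
        = PySem.List.pyRange 1 (2 * ((pvCount s : Nat) : Int) + 1) 1 by simp]
  rw [pv_odds, pv_evens]
  set t := pvCount s with ht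
  simp only [List.length_map, List.length_range]
  unfold pvCanon
  refine List.ext_getElem (by simp) ?_
  intro i h1 h2
  have hi : i < t := by simpa using h1
  simp [PySem.List.pyGet?_natCast, List.getElem?_map, hi]

theorem pv_B_sum (s : List (List (String × String))) (acc : Int) :
    s.foldl (fun acc d => acc + 2 * (d.length : Int)) acc = acc + 2 * (pvCount s : Int) := by
  induction s generalizing acc with
  | nil => simp [pvCount]
  | cons d tl ih =>
    rw [List.foldl_cons, ih]
    simp [pvCount]
    ring

theorem pv_B_canon (s : List (List (String × String))) :
    fn_hack_10_alt s = pvCanon (pvCount s) := by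
  unfold fn_hack_10_alt
  simp only []
  rw [pv_B_sum]
  rw [show PySem.Int.floordiv ((0 : Int) + 2 * (pvCount s : Int)) 2 = (pvCount s : Int) by
        rw [PySem.Int.floordiv_eq_ediv_of_pos (by norm_num : (0:Int) < 2)]; omega]
  rw [PySem.List.pyRange_one]
  unfold pvCanon
  rw [show (((pvCount s : Int) - 0).toNat) = pvCount s by omega]
  simp [List.map_map, Function.comp]

-- ===== VERDICT (by name: the statement is the Claim_ definition above) =====
theorem fn_hack_10_spec : Claim_equal_fn_hack_10 := by
  intro s _
  unfold Spec_fn_hack_10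
  rw [pv_A_canon, pv_B_canon]
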